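-- pv_equiv track=rewrite | github.com/jrima12/CS-115 | old/Homework2.py | filFunc
-- ===== SOURCE A (Python) =====
-- def checkLetter(Word, Rack):
--     ''' Checks to see if letters in word in Dictionary are in rack'''
--     Word = sorted(Word)
--     if Word == []:
--         return True
--     if Rack == []:
--         return False
--     if Word[0] in Rack:
--         ind = Rack.index(Word[0])+1
--         return checkLetter(Word[1:], Rack[ind:])
--     else:
--         return False
--
-- def TFList(Dict, Rack):
--     Rack.sort()
--     '''this function builds a True/False list based on which words in dictionary can be built from rack'''
--     if Dict == []:
--         return []
--     else:
--         return [checkLetter(Dict[0], Rack)] + TFList(Dict[1:], Rack)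
--
-- def filFunc(Dict, Rack):
--     '''this will filter the words in the dictionary based off the true and false list in the TFList function'''
--     tflist = TFList(Dict, Rack)
--     if tflist == []:
--         return []
--     if tflist[0] == True:
--         return [Dict[0]] + filFunc(Dict[1:], Rack)
--     if tflist[0] == False:
--         return [] + filFunc(Dict[1:], Rack)
-- ===== SOURCE B (Python) =====
-- def filFunc(Dict, Rack):
--     # Count rack entries once; a word is kept iff each of its letters occurs
--     # at most as often in the word as the matching one-letter entry in the rack.
--     # (A additionally sorts Rack in place; equivalence is about the return value only.)
--     rc = {}
--     for e in Rack:
--         rc[e] = rc.get(e, 0) + 1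
--     result = []
--     for w in Dict:
--         wc = {}
--         for ch in w:
--             wc[ch] = wc.get(ch, 0) + 1
--         if all(wc[ch] <= rc.get(ch, 0) for ch in wc):
--             result.append(w)
--     return result
-- ===== Notes on version B (the rewrite author's own statement) =====
-- stated objective: faster
-- what changed: Replaces A's recursive sort-and-greedily-consume check (re-running TFList over the whole remaining dictionary at every filFunc step) with a single pass that builds letter-count tables once and keeps a word iff each letter count fits the rack's count.
import Mathlib
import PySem

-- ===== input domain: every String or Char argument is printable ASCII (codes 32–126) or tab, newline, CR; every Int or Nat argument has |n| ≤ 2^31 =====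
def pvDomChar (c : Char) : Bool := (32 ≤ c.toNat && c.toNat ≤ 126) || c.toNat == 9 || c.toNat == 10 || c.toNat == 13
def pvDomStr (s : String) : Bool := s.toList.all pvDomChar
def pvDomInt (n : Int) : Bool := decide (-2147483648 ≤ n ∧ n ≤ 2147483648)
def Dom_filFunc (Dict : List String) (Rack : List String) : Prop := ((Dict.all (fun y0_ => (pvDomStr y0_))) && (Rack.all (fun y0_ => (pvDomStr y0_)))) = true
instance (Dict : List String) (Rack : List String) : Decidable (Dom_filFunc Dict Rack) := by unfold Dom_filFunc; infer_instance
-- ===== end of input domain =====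

-- B replaces A's sort-and-greedily-consume recursion (with its quadratic re-computation of the
-- whole True/False list at every step) by one pass building count tables and comparing counts.
-- A sorts Rack in place (Rack.sort()); B does not — the equivalence proved is about the return value only.

-- ===== PORT A =====
-- checkLetter's recursion after 'Word = sorted(Word)'; 'Word[0] in Rack' compares the 1-char string.
def checkLetterGo : List Char → List String → Bool
  | [], _ => true
  | c :: W', R =>
    if R = [] then false
    else if String.ofList [c] ∈ R then
      match PySem.List.index? R (String.ofList [c]) with
      | some i => checkLetterGo W' (PySem.List.slice R (some ((i + 1 : Nat) : Int)) none)  -- Rack[ind:]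
      | none => false  -- unreachable: membership was checked (Rack.index would raise otherwise)
    else false

def checkLetter (Word : String) (Rack : List String) : Bool :=
  checkLetterGo (PySem.List.sorted Word.toList (fun x => x) false) Rack

-- TFList sorts Rack in place first (value-wise: the recursion proceeds on the sorted rack).
def TFList (Dict : List String) (Rack : List String) : List Bool :=
  let R := PySem.List.sorted Rack (fun x => x) false
  match Dict with
  | [] => []
  | d :: ds => checkLetter d R :: TFList ds R

def filFunc (Dict : List String) (Rack : List String) : List String :=
  match Dict with
  | [] => []  -- tflist == []
  | d :: ds =>
    match TFList (d :: ds) Rack with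
    | [] => []
    | b :: _ => if b then d :: filFunc ds Rack else filFunc ds Rack

-- ===== PORT B =====
def filFunc_alt (Dict : List String) (Rack : List String) : List String :=
  let rc : PySem.Dict String Int := Rack.foldl (fun d e => d.insert e (d.getD e 0 + 1)) PySem.Dict.empty
  Dict.foldl (fun result w =>
    let wc : PySem.Dict Char Int := w.toList.foldl (fun d ch => d.insert ch (d.getD ch 0 + 1)) PySem.Dict.empty
    if wc.keys.all (fun ch => wc.getD ch 0 ≤ rc.getD (String.ofList [ch]) 0)
    then result ++ [w] else result) []

-- ===== PRECONDITION & SPEC =====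
def Spec_filFunc (Dict : List String) (Rack : List String) (out : List String) : Prop := out = filFunc_alt Dict Rack
instance (Dict : List String) (Rack : List String) (out : List String) : Decidable (Spec_filFunc Dict Rack out) := by unfold Spec_filFunc; infer_instance

-- ===== CLAIM (what is proved, stated in full; the proofs are below) =====
def Claim_equal_filFunc : Prop := ∀ (Dict : List String) (Rack : List String), Dom_filFunc Dict Rack → Spec_filFunc Dict Rack (filFunc Dict Rack)

-- ===== LEMMAS AND PROOFS =====

-- the multiset condition both programs decide: every letter of w occurs in w at most as often
-- as the corresponding one-letter string occurs in Rack
def CanBuild (w : String) (Rack : List String) : Prop :=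
  ∀ c ∈ w.toList, w.toList.count c ≤ Rack.count (String.ofList [c])

theorem ofList_singleton_inj {c d : Char} : String.ofList [c] = String.ofList [d] ↔ c = d := by
  constructor
  · intro h
    have := congrArg String.toList h
    simpa using this
  · rintro rfl; rfl

theorem ofList_singleton_le {c d : Char} (h : c ≤ d) : String.ofList [c] ≤ String.ofList [d] := by
  rw [String.le_iff_toList_le]
  simp only [String.toList_ofList]
  rcases lt_or_eq_of_le h with h' | rfl
  · exact le_of_lt (List.Lex.rel h')
  · exact le_refl _

-- greedy consumption over a sorted rack decides the count condition, for a sorted word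
theorem greedy (W : List Char) : ∀ (R : List String), W.Pairwise (· ≤ ·) → R.Pairwise (· ≤ ·) →
    (checkLetterGo W R = true ↔ ∀ c ∈ W, W.count c ≤ R.count (String.ofList [c])) := by
  induction W with
  | nil => intro R _ _; simp [checkLetterGo]
  | cons c W' ih =>
    intro R hW hR
    by_cases hRnil : R = []
    · subst hRnil
      simp only [checkLetterGo]
      constructor
      · intro h; cases h
      · intro h
        have := h c (List.mem_cons_self ..)
        simp at this
    · by_cases hmem : String.ofList [c] ∈ R
      · have hsome : (PySem.List.index? R (String.ofList [c])).isSome :=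
          (PySem.List.index?_isSome_iff R _).mpr hmem
        obtain ⟨i, hi⟩ := Option.isSome_iff_exists.mp hsome
        obtain ⟨hk, hRi, hbef⟩ := PySem.List.getElem_of_index?_eq_some hi
        have hWt : W'.Pairwise (· ≤ ·) := (List.pairwise_cons.mp hW).2
        have hhead : ∀ d ∈ W', c ≤ d := (List.pairwise_cons.mp hW).1
        have hRd : (R.drop (i+1)).Pairwise (· ≤ ·) := hR.drop
        have hstep : checkLetterGo (c :: W') R = checkLetterGo W' (R.drop (i+1)) := by
          simp only [checkLetterGo]
          rw [if_neg hRnil, if_pos hmem, hi]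
          exact congrArg _ (PySem.List.slice_from_natCast R (i + 1))
        rw [hstep, ih _ hWt hRd]
        have hbefore_lt : ∀ e ∈ R.take i, e < String.ofList [c] := by
          intro e he
          obtain ⟨j, hj, rfl⟩ := List.mem_iff_getElem.mp he
          have hjlen : j < i := lt_of_lt_of_le hj (by simp)
          rw [List.getElem_take]
          have hle : R[j] ≤ R[i] :=
            (List.pairwise_iff_getElem.mp hR) j i (lt_trans hjlen hk) hk hjlen
          rw [hRi] at hle
          exact lt_of_le_of_ne hle (hbef j hjlen)
        have hcnt : ∀ d : Char, c ≤ d →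
            R.count (String.ofList [d]) = (if d = c then 1 else 0) + (R.drop (i+1)).count (String.ofList [d]) := by
          intro d hcd
          conv_lhs => rw [← List.take_append_drop (i+1) R]
          have htake : R.take (i+1) = R.take i ++ [R[i]] := by
            rw [List.take_add_one]
            simp [List.getElem?_eq_getElem hk]
          rw [htake, List.count_append, List.count_append]
          have h0 : (R.take i).count (String.ofList [d]) = 0 := by
            rw [List.count_eq_zero]
            intro hmem'
            exact absurd (lt_of_lt_of_le (hbefore_lt _ hmem') (ofList_singleton_le hcd)) (lt_irrefl _)
          have h1 : List.count (String.ofList [d]) [R[i]] = (if d = c then 1 else 0) := by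
            rw [hRi]
            by_cases hdc : d = c
            · simp [hdc]
            · simp [hdc, List.count_singleton]
              intro hEq
              exact hdc (ofList_singleton_inj.mp hEq.symm)
          rw [h0, h1]
          omega
        constructor
        · intro h d hd
          rcases List.mem_cons.mp hd with rfl | hd'
          · rw [List.count_cons, hcnt d le_rfl]
            by_cases hcW : d ∈ W'
            · have := h d hcW
              simp only [beq_self_eq_true, if_true]
              omega
            · rw [List.count_eq_zero_of_not_mem hcW]
              simp
          · have hcd := hhead d hd'
            have htl := h d hd'
            rw [List.count_cons, hcnt d hcd]
            by_cases hdc : d = c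
            · subst hdc
              simp only [beq_self_eq_true, if_true]
              omega
            · rw [if_neg (by simpa using Ne.symm hdc), if_neg hdc]
              omega
        · intro h d hd
          have hcd := hhead d hd
          have hful := h d (List.mem_cons_of_mem _ hd)
          rw [List.count_cons, hcnt d hcd] at hful
          by_cases hdc : d = c
          · subst hdc
            simp only [beq_self_eq_true, if_true] at hful
            omega
          · rw [if_neg (by simpa using Ne.symm hdc), if_neg hdc] at hful
            omega
      · have hfalse : checkLetterGo (c :: W') R = false := by
          simp [checkLetterGo, hRnil, hmem]
        rw [hfalse]
        simp only [Bool.false_eq_true, false_iff]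
        intro h
        have := h c (List.mem_cons_self ..)
        rw [List.count_eq_zero_of_not_mem hmem] at this
        simp at this

theorem checkLetter_iff (w : String) (Rack : List String) :
    checkLetter w (PySem.List.sorted Rack (fun x => x) false) = true ↔ CanBuild w Rack := by
  unfold checkLetter CanBuild
  have hp1 : (PySem.List.sorted w.toList (fun x => x) false).Pairwise (· ≤ ·) :=
    PySem.List.sorted_pairwise w.toList (fun x => x)
  have hp2 : (PySem.List.sorted Rack (fun x => x) false).Pairwise (· ≤ ·) :=
    PySem.List.sorted_pairwise Rack (fun x => x)
  rw [greedy _ _ hp1 hp2]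
  have hw := PySem.List.sorted_perm w.toList (fun x => x) false
  have hr := PySem.List.sorted_perm Rack (fun x => x) false
  constructor
  · intro h c hc
    have := h c ((PySem.List.mem_sorted ..).mpr hc)
    rwa [hw.count_eq, hr.count_eq] at this
  · intro h c hc
    rw [hw.count_eq, hr.count_eq]
    exact h c ((PySem.List.mem_sorted ..).mp hc)

-- A is 'filter by checkLetter against the sorted rack'
theorem filFunc_eq_filter (Dict Rack : List String) :
    filFunc Dict Rack = Dict.filter (fun w => checkLetter w (PySem.List.sorted Rack (fun x => x) false)) := by
  induction Dict with
  | nil => rfl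
  | cons d ds ih =>
    simp only [filFunc, TFList, List.filter_cons]
    by_cases h : checkLetter d (PySem.List.sorted Rack (fun x => x) false) = true
    · simp [h, ih]
    · simp [Bool.eq_false_iff.mpr h, ih]

def predB (Rack : List String) (w : String) : Bool :=
  (PySem.Dict.counter w.toList).keys.all
    (fun ch => (PySem.Dict.counter w.toList).getD ch 0 ≤ (PySem.Dict.counter Rack).getD (String.ofList [ch]) 0)

theorem filFunc_alt_eq_filter (Dict Rack : List String) :
    filFunc_alt Dict Rack = Dict.filter (predB Rack) := by
  show Dict.foldl (fun result w => if predB Rack w then result ++ [w] else result) [] = _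
  rw [PySem.List.foldl_append_if_eq_filter (predB Rack) Dict []]
  rfl

theorem predB_iff (w : String) (Rack : List String) : predB Rack w = true ↔ CanBuild w Rack := by
  unfold predB CanBuild
  rw [List.all_eq_true]
  simp only [PySem.Dict.keys_counter, PySem.Dict.getD_counter, decide_eq_true_eq]
  constructor
  · intro h c hc
    exact_mod_cast h c ((PySem.Set.mem_ofList ..).mpr hc)
  · intro h c hc
    exact_mod_cast h c ((PySem.Set.mem_ofList ..).mp hc)

-- ===== VERDICT (by name: the statement is the Claim_ definition above) =====
theorem filFunc_spec : Claim_equal_filFunc := by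
  intro Dict Rack _
  unfold Spec_filFunc
  rw [filFunc_eq_filter, filFunc_alt_eq_filter]
  apply List.filter_congr
  intro w _
  rw [Bool.eq_iff_iff, checkLetter_iff, predB_iff]
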